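-- pv_equiv track=rewrite | github.com/mc-putchar/AoC24 | 01/solution.py | find_similarity
-- ===== SOURCE A (Python) =====
-- def find_similarity(list1, list2):
-- 	similarity = 0
-- 	cache = {}
-- 	for i in range(len(list1)):
-- 		if list1[i] not in cache:
-- 			cache[list1[i]] = list2.count(list1[i])
-- 		similarity += cache[list1[i]] * list1[i]
-- 	return similarity
-- ===== SOURCE B (Python) =====
-- def find_similarity(list1, list2):
--     c1 = {}
--     for x in list1:
--         c1[x] = c1.get(x, 0) + 1
--     c2 = {}
--     for y in list2:
--         c2[y] = c2.get(y, 0) + 1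
--     total = 0
--     for v, n in c1.items():
--         total += v * n * c2.get(v, 0)
--     return total
-- ===== Notes on version B (the rewrite author's own statement) =====
-- stated objective: faster
-- what changed: B builds frequency tables for both lists in one pass each and sums v * count1(v) * count2(v) over the distinct values of list1, instead of visiting every occurrence of list1 and calling list2.count (a full scan) on each new value.
import Mathlib
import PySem

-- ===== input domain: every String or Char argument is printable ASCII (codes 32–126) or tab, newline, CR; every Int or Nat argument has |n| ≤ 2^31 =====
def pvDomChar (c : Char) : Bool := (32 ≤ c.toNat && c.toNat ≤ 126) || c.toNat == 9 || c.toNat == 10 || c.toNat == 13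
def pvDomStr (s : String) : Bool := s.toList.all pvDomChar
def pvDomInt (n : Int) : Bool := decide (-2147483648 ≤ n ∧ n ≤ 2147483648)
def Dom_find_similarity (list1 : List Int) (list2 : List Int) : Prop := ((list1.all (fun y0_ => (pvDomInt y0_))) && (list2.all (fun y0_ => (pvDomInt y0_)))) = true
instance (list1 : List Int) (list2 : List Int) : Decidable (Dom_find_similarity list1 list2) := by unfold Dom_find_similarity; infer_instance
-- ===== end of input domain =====

-- B replaces A's per-occurrence loop with its list2.count scan by two one-pass frequency
-- tables and a single loop over the distinct values of list1 (objective: faster, O(n+m) vs O(n*m)).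

-- ===== PORT A =====
-- for i in range(len(list1)): if list1[i] not in cache: cache[list1[i]] = list2.count(list1[i]);
-- similarity += cache[list1[i]] * list1[i]   (indices always in range, so pyGetD's default is never used)
def find_similarity (list1 : List Int) (list2 : List Int) : Int :=
  ((PySem.List.pyRange 0 (PySem.List.len list1) 1).foldl
    (fun (st : Int × PySem.Dict Int Int) i =>
      let x := PySem.List.pyGetD list1 i 0
      let cache := if st.2.contains x then st.2 else st.2.insert x (PySem.List.count list2 x)
      (st.1 + cache.getD x 0 * x, cache))
    (0, PySem.Dict.empty)).1

-- ===== PORT B =====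
def find_similarity_alt (list1 : List Int) (list2 : List Int) : Int :=
  let c1 := list1.foldl (fun (d : PySem.Dict Int Int) x => d.insert x (d.getD x 0 + 1)) PySem.Dict.empty
  let c2 := list2.foldl (fun (d : PySem.Dict Int Int) y => d.insert y (d.getD y 0 + 1)) PySem.Dict.empty
  c1.items.foldl (fun total p => total + p.1 * p.2 * c2.getD p.1 0) 0

-- ===== PRECONDITION & SPEC =====
def Spec_find_similarity (list1 : List Int) (list2 : List Int) (out : Int) : Prop := out = find_similarity_alt list1 list2
instance (list1 : List Int) (list2 : List Int) (out : Int) : Decidable (Spec_find_similarity list1 list2 out) := by unfold Spec_find_similarity; infer_instance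

-- ===== CLAIM (what is proved, stated in full; the proofs are below) =====
def Claim_equal_find_similarity : Prop := ∀ (list1 : List Int) (list2 : List Int), Dom_find_similarity list1 list2 → Spec_find_similarity list1 list2 (find_similarity list1 list2)

-- ===== LEMMAS AND PROOFS =====

-- A's loop, after trading range-indexing for direct element traversal
def pvStepA (list2 : List Int) (st : Int × PySem.Dict Int Int) (x : Int) : Int × PySem.Dict Int Int :=
  let cache := if st.2.contains x then st.2 else st.2.insert x (PySem.List.count list2 x)
  (st.1 + cache.getD x 0 * x, cache)

lemma pvA_eq_foldl (list1 list2 : List Int) :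
    find_similarity list1 list2 = (list1.foldl (pvStepA list2) (0, PySem.Dict.empty)).1 := by
  unfold find_similarity
  exact congrArg Prod.fst
    (PySem.List.foldl_pyRange_zero_pyGetD list1 0 (pvStepA list2) (0, PySem.Dict.empty))

-- cache invariant: every stored value is the true count in list2
lemma pvA_loop (list2 : List Int) :
    ∀ (l : List Int) (sim : Int) (cache : PySem.Dict Int Int),
      (∀ k, cache.contains k = true → cache.getD k 0 = PySem.List.count list2 k) →
      (l.foldl (pvStepA list2) (sim, cache)).1
        = sim + (l.map (fun x => PySem.List.count list2 x * x)).sum := by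
  intro l
  induction l with
  | nil => intro sim cache _; simp
  | cons x l ih =>
    intro sim cache hinv
    have hx : (if cache.contains x then cache
        else cache.insert x (PySem.List.count list2 x)).getD x 0 = PySem.List.count list2 x := by
      by_cases h : cache.contains x = true
      · simpa [h] using hinv x h
      · simp [h, PySem.Dict.getD_insert_self]
    have hinv' : ∀ k, (if cache.contains x then cache
        else cache.insert x (PySem.List.count list2 x)).contains k = true →
        (if cache.contains x then cache
          else cache.insert x (PySem.List.count list2 x)).getD k 0 = PySem.List.count list2 k := by
      intro k hk
      by_cases h : cache.contains x = true
      · simpa [h] using hinv k (by simpa [h] using hk)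
      · simp only [h, if_false, Bool.false_eq_true] at hk ⊢
        rw [PySem.Dict.getD_insert]
        by_cases hkx : k = x
        · simp [hkx]
        · have : cache.contains k = true := by
            rw [PySem.Dict.contains_insert] at hk
            simpa [hkx] using hk
          simp [hkx, hinv k this]
    show ((l.foldl (pvStepA list2) (pvStepA list2 (sim, cache) x))).1 = _
    have hstep : pvStepA list2 (sim, cache) x
        = (sim + (PySem.List.count list2 x : Int) * x,
           if cache.contains x = true then cache
           else cache.insert x (PySem.List.count list2 x)) := by
      simp only [pvStepA]
      rw [hx]
    rw [hstep, ih _ _ hinv']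
    simp [add_assoc]

lemma pvOfList_toFinset (l : List Int) :
    (PySem.Set.ofList l).toFinset = l.toFinset := by
  ext x; simp [List.mem_toFinset, PySem.Set.mem_ofList]

-- the grouping identity: per-occurrence sum = per-distinct-value sum with multiplicities
lemma pvGroup (list1 : List Int) (f : Int → Int) :
    (list1.map (fun x => f x * x)).sum
      = ((PySem.Set.ofList list1).map (fun k => k * (list1.count k : Int) * f k)).sum := by
  rw [Finset.sum_list_map_count list1 (fun x => f x * x)]
  rw [← List.sum_toFinset _ (PySem.Set.nodup_ofList list1), pvOfList_toFinset]
  refine Finset.sum_congr rfl ?_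
  intro m _
  simp
  ring

theorem find_similarity_spec : Claim_equal_find_similarity := by
  unfold Claim_equal_find_similarity
  intro list1 list2 _
  unfold Spec_find_similarity
  have hB : find_similarity_alt list1 list2
      = (PySem.Dict.counter list1).items.foldl
          (fun total p => total + p.1 * p.2 * (PySem.Dict.counter list2).getD p.1 0) 0 := rfl
  rw [pvA_eq_foldl, pvA_loop list2 list1 0 PySem.Dict.empty (by intro k hk; simp at hk)]
  rw [hB, PySem.Dict.items_counter]
  rw [PySem.List.foldl_add (g := fun p : Int × Int => p.1 * p.2 * (PySem.Dict.counter list2).getD p.1 0)]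
  simp only [List.map_map, PySem.Dict.getD_counter, PySem.List.count_eq]
  rw [pvGroup list1 (fun x => ((List.count x list2 : Int)))]
  simp [Function.comp_def]
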